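-- pv_equiv track=rewrite | github.com/sl7423/mec-mini-projects | mec-3.4.1-api-mini-project/data_wrangling.py | find_diff_values
-- ===== SOURCE A (Python) =====
-- def find_diff_values(dic, title):
--     lst = dic[title]
--     diff_value = 0
--     for value in range(len(lst)):
--         if lst[value] is None:
--             lst[value] = 0
--         if value > 0 and (lst[value] - lst[value-1]) > diff_value:
--             diff_value = lst[value] - lst[value-1]
--     return diff_value
-- ===== SOURCE B (Python) =====
-- def _maxdiff(seg):
--     # divide & conquer: max(0, max consecutive difference) of seg
--     n = len(seg)
--     if n <= 1:
--         return 0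
--     if n == 2:
--         return max(0, seg[1] - seg[0])
--     m = n // 2
--     # halves share the boundary element seg[m], so every consecutive pair is covered
--     return max(_maxdiff(seg[:m + 1]), _maxdiff(seg[m:]))
--
--
-- def find_diff_values(dic, title):
--     lst = dic[title]
--     # same in-place mutation as A: None -> 0
--     for i in range(len(lst)):
--         if lst[i] is None:
--             lst[i] = 0
--     return _maxdiff(lst)
-- ===== Notes on version B (the rewrite author's own statement) =====
-- stated objective: alternative
-- what changed: A's single fused index loop (conditional None-fix interleaved with a running max of lst[i]-lst[i-1]) is replaced by a normalization pass (same in-place None->0 mutation) followed by a divide-and-conquer recursion that splits the list at its midpoint with a shared boundary element and combines the two halves' answers with max; the equivalence proved is about the return value, and B performs the same in-place mutation as A.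
import Mathlib
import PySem

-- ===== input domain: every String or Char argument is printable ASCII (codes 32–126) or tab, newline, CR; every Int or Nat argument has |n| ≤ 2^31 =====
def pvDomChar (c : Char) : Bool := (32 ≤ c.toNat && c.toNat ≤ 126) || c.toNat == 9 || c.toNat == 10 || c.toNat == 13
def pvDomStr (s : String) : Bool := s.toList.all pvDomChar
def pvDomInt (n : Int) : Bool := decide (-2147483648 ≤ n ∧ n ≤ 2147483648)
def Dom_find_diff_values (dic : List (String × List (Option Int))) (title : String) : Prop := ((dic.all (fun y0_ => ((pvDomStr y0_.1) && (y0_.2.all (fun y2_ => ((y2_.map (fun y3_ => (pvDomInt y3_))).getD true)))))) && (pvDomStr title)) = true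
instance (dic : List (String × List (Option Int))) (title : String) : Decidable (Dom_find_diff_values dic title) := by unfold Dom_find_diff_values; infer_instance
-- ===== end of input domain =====

-- B replaces A's fused loop (None-fix + running max of consecutive differences) by a normalize
-- pass followed by a divide-and-conquer recursion splitting the list at its midpoint with a
-- shared boundary element (objective: alternative). A (and B) mutate dic[title] in place
-- (None -> 0); the equivalence proved here is about the return value.

-- ===== PORT A =====
-- one iteration of A's for-loop: state = (lst, diff_value)
def fdvStep (st : List (Option Int) × Int) (i : Nat) : List (Option Int) × Int :=
  let lst := if PySem.List.pyGet? st.1 (i : Int) = some none then st.1.set i (some 0) else st.1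
  let cur := ((PySem.List.pyGet? lst (i : Int)).getD (some 0)).getD 0
  let prev := ((PySem.List.pyGet? lst ((i : Int) - 1)).getD (some 0)).getD 0
  let d := if 0 < i ∧ cur - prev > st.2 then cur - prev else st.2
  (lst, d)

def find_diff_values (dic : List (String × List (Option Int))) (title : String) : Int :=
  match List.lookup title dic with        -- dic[title]; none = KeyError, excluded by Pre_
  | none => 0
  | some lst =>
    ((List.range lst.length).foldl fdvStep (lst, 0)).2

-- ===== PORT B =====
-- Source B's _maxdiff: divide and conquer; seg[:m+1] / seg[m:] with nonnegative bounds = take/drop,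
-- and n // 2 on a nonnegative n is Nat division
def fdvMaxDiff (seg : List Int) : Int :=
  if _h1 : seg.length ≤ 1 then 0
  else if _h2 : seg.length = 2 then
    max 0 ((PySem.List.pyGet? seg 1).getD 0 - (PySem.List.pyGet? seg 0).getD 0)
  else
    max (fdvMaxDiff (seg.take (seg.length / 2 + 1))) (fdvMaxDiff (seg.drop (seg.length / 2)))
termination_by seg.length
decreasing_by
  · simp only [List.length_take]; omega
  · simp only [List.length_drop]; omega

def find_diff_values_alt (dic : List (String × List (Option Int))) (title : String) : Int :=
  match List.lookup title dic with        -- dic[title]; none = KeyError, excluded by Pre_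
  | none => 0
  | some lst =>
    let norm := lst.map (fun o => o.getD 0)   -- normalization pass (None -> 0)
    fdvMaxDiff norm

-- ===== PRECONDITION & SPEC =====
-- Pre_: title must be a key of dic, otherwise Python A raises KeyError
def Pre_find_diff_values (dic : List (String × List (Option Int))) (title : String) : Prop :=
  (List.lookup title dic).isSome = true
instance (dic : List (String × List (Option Int))) (title : String) : Decidable (Pre_find_diff_values dic title) := by unfold Pre_find_diff_values; infer_instance

def pvWitness_find_diff_values : (List (String × List (Option Int))) × String :=
  ([("a", [some 1, none, some 3])], "a")

def Spec_find_diff_values (dic : List (String × List (Option Int))) (title : String) (out : Int) : Prop := out = find_diff_values_alt dic title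
instance (dic : List (String × List (Option Int))) (title : String) (out : Int) : Decidable (Spec_find_diff_values dic title out) := by unfold Spec_find_diff_values; infer_instance

-- ===== CLAIM (what is proved, stated in full; the proofs are below) =====
def Claim_equal_find_diff_values : Prop := ∀ (dic : List (String × List (Option Int))) (title : String), Dom_find_diff_values dic title → Pre_find_diff_values dic title → Spec_find_diff_values dic title (find_diff_values dic title)

-- ===== LEMMAS AND PROOFS =====

-- the list state after A has processed indices 0..n-1: first n entries normalized
def fixTo (l : List (Option Int)) (n : Nat) : List (Option Int) :=
  (l.take n).map (fun o => some (o.getD 0)) ++ l.drop n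

-- the consecutive differences of an Int list (what both sides' answers reduce over)
def dz (l : List Int) : List Int := (l.zip l.tail).map (fun p => p.2 - p.1)

-- the list of consecutive differences of the normalized list
def fdvDiffs (l : List (Option Int)) : List Int := dz (l.map (fun o : Option Int => o.getD 0))

theorem fixTo_get?_lt (l : List (Option Int)) (n j : Nat) (hj : j < n) (hl : j < l.length) :
    (fixTo l n)[j]? = some (some ((l[j].getD 0))) := by
  unfold fixTo
  rw [List.getElem?_append_left (by simpa [Nat.lt_min] using ⟨hj, hl⟩)]
  simp [hj, hl]

theorem fixTo_get?_ge (l : List (Option Int)) (n j : Nat) (hj : n ≤ j) (hn : n ≤ l.length) :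
    (fixTo l n)[j]? = l[j]? := by
  unfold fixTo
  rw [List.getElem?_append_right (by simp [Nat.min_eq_left hn]; omega)]
  simp [Nat.min_eq_left hn, List.getElem?_drop]
  congr 1
  omega

theorem fixTo_step (l : List (Option Int)) (n : Nat) (hn : n < l.length) :
    (if (fixTo l n)[n]? = some none then (fixTo l n).set n (some 0) else fixTo l n)
      = fixTo l (n + 1) := by
  have hget : (fixTo l n)[n]? = l[n]? := fixTo_get?_ge l n n le_rfl (le_of_lt hn)
  have hset : (fixTo l n).set n (some (l[n].getD 0)) = fixTo l (n + 1) := by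
    apply List.ext_getElem?
    intro j
    rcases lt_trichotomy j n with hj | hj | hj
    · rw [List.getElem?_set_ne (by omega), fixTo_get?_lt l n j hj (lt_trans hj hn),
        fixTo_get?_lt l (n+1) j (by omega) (lt_trans hj hn)]
    · subst hj
      rw [List.getElem?_set_self (by simp [fixTo, Nat.min_eq_left (le_of_lt hn)]; omega),
        fixTo_get?_lt l (j+1) j (by omega) hn]
    · rw [List.getElem?_set_ne (by omega), fixTo_get?_ge l n j (by omega) (le_of_lt hn),
        fixTo_get?_ge l (n+1) j (by omega) hn]
  split
  · next h =>
    rw [hget, List.getElem?_eq_getElem hn] at h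
    have hx : l[n] = none := Option.some_injective _ h
    rw [← hset, hx]
    rfl
  · next h =>
    rw [hget, List.getElem?_eq_getElem hn] at h
    cases hv : l[n] with
    | none => exact absurd (by rw [hv]) h
    | some x =>
      rw [← hset, hv]
      symm
      apply List.ext_getElem?
      intro j
      by_cases hj : j = n
      · subst hj
        rw [List.getElem?_set_self (by simp [fixTo, Nat.min_eq_left (le_of_lt hn)]; omega),
          hget, List.getElem?_eq_getElem hn, hv]
        rfl
      · rw [List.getElem?_set_ne (by omega)]

theorem fdvDiffs_get? (l : List (Option Int)) (n : Nat) (hn : n + 1 < l.length) :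
    (fdvDiffs l)[n]? = some ((l[n+1].getD 0) - (l[n].getD 0)) := by
  unfold fdvDiffs dz
  have hlen : n < (((l.map (fun o : Option Int => o.getD 0)).zip
      (l.map (fun o : Option Int => o.getD 0)).tail).map (fun p => p.2 - p.1)).length := by
    simp; omega
  rw [List.getElem?_eq_getElem hlen]
  simp [List.getElem_zip, List.getElem_tail]

theorem fdvDiffs_length (l : List (Option Int)) : (fdvDiffs l).length = l.length - 1 := by
  unfold fdvDiffs dz
  simp

theorem fdv_invariant (l : List (Option Int)) (n : Nat) (hn : n ≤ l.length) :
    (List.range n).foldl fdvStep (l, 0)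
      = (fixTo l n, ((fdvDiffs l).take (n - 1)).foldl max 0) := by
  induction n with
  | zero => simp [fixTo]
  | succ n ih =>
    have hlt : n < l.length := hn
    rw [List.range_succ, List.foldl_append, ih (le_of_lt hlt)]
    show fdvStep _ n = _
    unfold fdvStep
    simp only [PySem.List.pyGet?_natCast, fixTo_step l n hlt]
    cases n with
    | zero => simp
    | succ m =>
      have hcur : (fixTo l (m+1+1))[m+1]? = some (some (l[m+1].getD 0)) :=
        fixTo_get?_lt l (m+1+1) (m+1) (by omega) hlt
      have hprev : ((m+1 : Nat) : Int) - 1 = ((m : Nat) : Int) := by push_cast; ring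
      have hprev2 : PySem.List.pyGet? (fixTo l (m+1+1)) (((m+1 : Nat) : Int) - 1)
          = some (some (l[m].getD 0)) := by
        rw [hprev, PySem.List.pyGet?_natCast]
        exact fixTo_get?_lt l (m+1+1) m (by omega) (by omega)
      rw [hcur, hprev2]
      have htake : (fdvDiffs l).take (m + 1 + 1 - 1) = (fdvDiffs l).take (m + 1 - 1) ++ [(l[m+1].getD 0) - (l[m].getD 0)] := by
        have hlen : m < (fdvDiffs l).length := by rw [fdvDiffs_length]; omega
        rw [show m + 1 + 1 - 1 = m + 1 from rfl, show m + 1 - 1 = m from rfl,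
          List.take_add_one, List.getElem?_eq_getElem hlen]
        have := fdvDiffs_get? l m hlt
        rw [List.getElem?_eq_getElem hlen] at this
        simp [Option.some_injective _ this]
      rw [htake, List.foldl_append]
      simp only [List.foldl_cons, List.foldl_nil, Option.getD_some, Nat.add_sub_cancel]
      congr 1
      rcases le_or_gt (l[m+1].getD 0 - l[m].getD 0) (((fdvDiffs l).take m).foldl max 0) with h | h
      · rw [if_neg (by omega), max_eq_left h]
      · rw [if_pos ⟨Nat.succ_pos m, h⟩, max_eq_right (le_of_lt h)]

-- A's loop computes the max-with-0 of the consecutive differences of the normalized list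
theorem fdv_main (l : List (Option Int)) :
    ((List.range l.length).foldl fdvStep (l, 0)).2 = (fdvDiffs l).foldl max 0 := by
  rw [fdv_invariant l l.length le_rfl]
  have : (fdvDiffs l).take (l.length - 1) = fdvDiffs l := by
    apply List.take_of_length_le
    rw [fdvDiffs_length]
  rw [this]

-- ---- B side: the divide-and-conquer recursion also computes foldl max 0 ∘ dz ----

theorem foldl_max_max (a b : Int) (l : List Int) :
    l.foldl max (max a b) = max a (l.foldl max b) := by
  induction l generalizing a b with
  | nil => rfl
  | cons h t ih => simpa [max_assoc] using ih a (max b h)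

theorem le_foldl_max (a : Int) (l : List Int) : a ≤ l.foldl max a := by
  induction l generalizing a with
  | nil => exact le_rfl
  | cons h t ih => exact le_trans (le_max_left a h) (ih (max a h))

theorem foldl_max_append (x y : List Int) :
    (x ++ y).foldl max (0 : Int) = max (x.foldl max 0) (y.foldl max 0) := by
  rw [List.foldl_append]
  have h0 : (0 : Int) ≤ x.foldl max 0 := le_foldl_max 0 x
  calc y.foldl max (x.foldl max 0)
      = y.foldl max (max (x.foldl max 0) 0) := by rw [max_eq_left h0]
    _ = max (x.foldl max 0) (y.foldl max 0) := foldl_max_max _ 0 y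

theorem dz_cons (a b : Int) (t : List Int) : dz (a :: b :: t) = (b - a) :: dz (b :: t) := by
  simp [dz]

-- splitting with a shared boundary element splits the difference list
theorem dz_split (l : List Int) (m : Nat) (h1 : 1 ≤ m) (h2 : m ≤ l.length - 1) :
    dz l = dz (l.take (m + 1)) ++ dz (l.drop m) := by
  induction m generalizing l with
  | zero => omega
  | succ k ih =>
    match l with
    | a :: b :: t =>
      cases k with
      | zero =>
        simp only [List.take, List.drop, dz_cons]
        have : dz [a, b] = [b - a] := by simp [dz]
        simp_all [dz]
      | succ j =>
        have hlen : j + 1 ≤ (b :: t).length - 1 := by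
          simp at h2 ⊢; omega
        have hrec := ih (b :: t) (by omega) hlen
        have htake : (a :: b :: t).take (j + 1 + 1 + 1) = a :: (b :: t).take (j + 1 + 1) := rfl
        have hdrop : (a :: b :: t).drop (j + 1 + 1) = (b :: t).drop (j + 1) := rfl
        rw [dz_cons, hrec, htake, hdrop]
        have hx : (b :: t).take (j + 1 + 1) = b :: t.take (j + 1) := rfl
        rw [hx, dz_cons]
        rfl
    | [a] => simp at h2
    | [] => simp at h2

theorem fdvMaxDiff_eq (l : List Int) : fdvMaxDiff l = (dz l).foldl max 0 := by
  fun_induction fdvMaxDiff l with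
  | case1 l h1 =>
    match l, h1 with
    | [], _ => rfl
    | [a], _ => rfl
  | case2 l h1 h2 =>
    match l, h2 with
    | [a, b], _ =>
      simp [dz, PySem.List.pyGet?, PySem.List.pyIdx?]
  | case3 l h1 h2 ih1 ih2 =>
    rw [ih1, ih2, ← foldl_max_append, ← dz_split l (l.length / 2) (by omega) (by omega)]

-- ===== VERDICT (by name: the statement is the Claim_ definition above) =====
theorem find_diff_values_spec : Claim_equal_find_diff_values := by
  intro dic title _ hpre
  unfold Spec_find_diff_values find_diff_values find_diff_values_alt
  rcases Option.isSome_iff_exists.mp hpre with ⟨lst, hlst⟩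
  rw [hlst]
  simp only
  rw [fdv_main lst, fdvMaxDiff_eq]
  rfl
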